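-- pv_equiv track=rewrite | github.com/Hari-sh-code/MindWise-Backend | backend/services/resume_service.py | rebuild_skill_categories
-- ===== SOURCE A (Python) =====
-- def rebuild_skill_categories(skills):
--     """Organize skills by category with strict priority ordering."""
--     CATEGORY_ORDER = [
--         "Programming Languages",
--         "Frameworks & Libraries",
--         "Databases",
--         "Tools & Technologies",
--         "Core Computer Science",
--         "Domain Skills",
--         "Soft Skills"
--     ]
--
--     categories = {}
--     for skill in skills:
--         name = skill.get("name")
--         if not name:
--             continue
--         category = skill.get("category") or "Domain Skills"
--         if category not in categories:
--             categories[category] = []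
--         categories[category].append(name)
--
--     # Build ordered dict — known categories first, then any custom ones
--     ordered = {}
--     for cat in CATEGORY_ORDER:
--         if cat in categories:
--             ordered[cat] = categories[cat]
--     # Append any custom user-defined categories not in the standard list
--     for cat, skills_list in categories.items():
--         if cat not in ordered:
--             ordered[cat] = skills_list
--
--     return ordered
-- ===== SOURCE B (Python) =====
-- def rebuild_skill_categories(skills):
--     """Organize skills by category with strict priority ordering."""
--     CATEGORY_ORDER = [
--         "Programming Languages",
--         "Frameworks & Libraries",
--         "Databases",
--         "Tools & Technologies",
--         "Core Computer Science",
--         "Domain Skills",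
--         "Soft Skills"
--     ]
--
--     def eff(skill):
--         return skill.get("category") or "Domain Skills"
--
--     named = [s for s in skills if s.get("name")]
--
--     # categories in first-appearance order
--     seen = []
--     for s in named:
--         c = eff(s)
--         if c not in seen:
--             seen.append(c)
--
--     order = [c for c in CATEGORY_ORDER if c in seen] + \
--             [c for c in seen if c not in CATEGORY_ORDER]
--
--     return {c: [s.get("name") for s in named if eff(s) == c] for c in order}
-- ===== Notes on version B (the rewrite author's own statement) =====
-- stated objective: simpler
-- what changed: A builds a grouping dict and then reconstructs an ordered dict with two imperative insertion loops; B is a declarative pipeline: filter the named skills, dedup their categories in first-appearance order, concatenate two list filters (known order, then custom) to get the key order, and map each category directly to its list of names.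
import Mathlib
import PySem

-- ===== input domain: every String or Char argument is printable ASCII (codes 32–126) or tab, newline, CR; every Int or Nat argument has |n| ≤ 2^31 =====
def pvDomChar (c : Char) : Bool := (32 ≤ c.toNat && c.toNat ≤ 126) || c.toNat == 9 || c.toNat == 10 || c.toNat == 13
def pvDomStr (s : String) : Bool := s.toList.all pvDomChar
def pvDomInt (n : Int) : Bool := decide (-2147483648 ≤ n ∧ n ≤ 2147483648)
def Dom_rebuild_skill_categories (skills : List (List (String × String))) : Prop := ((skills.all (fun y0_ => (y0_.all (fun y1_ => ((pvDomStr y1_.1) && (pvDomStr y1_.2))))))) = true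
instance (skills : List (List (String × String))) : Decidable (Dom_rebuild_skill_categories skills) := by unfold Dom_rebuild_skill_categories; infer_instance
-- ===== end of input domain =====

-- B replaces A's grouping dict and its two hand-written ordered-dict-building loops by a
-- declarative pipeline (filter named skills, dedup categories in first-appearance order,
-- build the key order by two list filters, map each category to its names); objective: simpler.

def pvCategoryOrder : List String :=
  ["Programming Languages", "Frameworks & Libraries", "Databases",
   "Tools & Technologies", "Core Computer Science", "Domain Skills", "Soft Skills"]

-- ===== PORT A =====
-- skill.get(k) on a dict = first-match association lookup (List.lookup).
-- 'if category not in categories: categories[category] = []' followed by an append to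
-- categories[category] is exactly Dict.modify category [] (· ++ [name])  (d[k] = f(d.get(k, []))).
def rebuild_skill_categories (skills : List (List (String × String))) : List (String × List String) :=
  let categories : PySem.Dict String (List String) :=
    skills.foldl (fun cats skill =>
      match List.lookup "name" skill with
      | none => cats                                   -- name is None: continue
      | some name =>
        if name = "" then cats                         -- falsy name: continue
        else
          let category :=
            match List.lookup "category" skill with
            | none => "Domain Skills"
            | some c => if c = "" then "Domain Skills" else c
          cats.modify category [] (· ++ [name])) PySem.Dict.empty
  let ordered : PySem.Dict String (List String) :=
    pvCategoryOrder.foldl (fun ord cat =>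
      if categories.contains cat then ord.insert cat (categories.getD cat []) else ord)
      PySem.Dict.empty
  let ordered :=
    categories.items.foldl (fun ord p =>
      if ord.contains p.1 then ord else ord.insert p.1 p.2) ordered
  ordered.items

-- ===== PORT B =====
-- eff(skill) = skill.get("category") or "Domain Skills"
def pvEff (skill : List (String × String)) : String :=
  match List.lookup "category" skill with
  | none => "Domain Skills"
  | some c => if c = "" then "Domain Skills" else c

-- truthiness of skill.get("name")
def pvHasName (skill : List (String × String)) : Bool :=
  match List.lookup "name" skill with
  | none => false
  | some n => n ≠ ""

def rebuild_skill_categories_alt (skills : List (List (String × String))) : List (String × List String) :=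
  let named := skills.filter pvHasName
  -- the 'seen' loop (append if not already present) is exactly PySem.Set.add
  let seen : PySem.Set String := named.foldl (fun seen s => PySem.Set.add seen (pvEff s)) []
  let order := pvCategoryOrder.filter (fun c => seen.contains c)
               ++ seen.filter (fun c => !pvCategoryOrder.contains c)
  order.map (fun c =>
    (c, (named.filter (fun s => pvEff s == c)).map (fun s => (List.lookup "name" s).getD "")))

-- ===== PRECONDITION & SPEC =====
def Spec_rebuild_skill_categories (skills : List (List (String × String))) (out : List (String × List String)) : Prop := out = rebuild_skill_categories_alt skills
instance (skills : List (List (String × String))) (out : List (String × List String)) : Decidable (Spec_rebuild_skill_categories skills out) := by unfold Spec_rebuild_skill_categories; infer_instance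

-- ===== CLAIM (what is proved, stated in full; the proofs are below) =====
def Claim_equal_rebuild_skill_categories : Prop := ∀ (skills : List (List (String × String))), Dom_rebuild_skill_categories skills → Spec_rebuild_skill_categories skills (rebuild_skill_categories skills)

-- ===== LEMMAS AND PROOFS =====

-- a skill's name, defined where pvHasName holds
def pvName (s : List (String × String)) : String := (List.lookup "name" s).getD ""

theorem pvFoldA_aux (skills : List (List (String × String))) :
    ∀ (d : PySem.Dict String (List String)),
    skills.foldl (fun cats skill =>
      match List.lookup "name" skill with
      | none => cats
      | some name =>
        if name = "" then cats
        else
          let category :=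
            match List.lookup "category" skill with
            | none => "Domain Skills"
            | some c => if c = "" then "Domain Skills" else c
          cats.modify category [] (· ++ [name])) d
    = (skills.filter pvHasName).foldl (fun d s => d.modify (pvEff s) [] (· ++ [pvName s])) d := by
  induction skills with
  | nil => intro d; rfl
  | cons s rest ih =>
    intro d
    simp only [List.foldl_cons, List.filter_cons]
    rcases h : List.lookup "name" s with _ | n
    · simp [pvHasName, h, ih]
    · by_cases hn : n = ""
      · simp [pvHasName, h, hn, ih]
      · simp [pvHasName, h, hn, ih, pvEff, pvName]
def pvCatsOf (skills : List (List (String × String))) : PySem.Dict String (List String) :=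
  (skills.filter pvHasName).foldl (fun d s => d.modify (pvEff s) [] (· ++ [pvName s])) PySem.Dict.empty

theorem pvKeys_catsOf (skills : List (List (String × String))) :
    (pvCatsOf skills).keys = PySem.Set.ofList ((skills.filter pvHasName).map pvEff) := by
  unfold pvCatsOf
  rw [PySem.Dict.keys_foldl_modify_key _ pvEff [] (fun _ s => (· ++ [pvName s]))]
  simp [PySem.Set.ofList_eq_foldl, PySem.Set.update, PySem.Dict.keys_empty]

theorem pvNodup_keys_catsOf (skills : List (List (String × String))) :
    (pvCatsOf skills).keys.Nodup := by
  unfold pvCatsOf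
  exact PySem.Dict.nodup_keys_foldl_modify_key _ pvEff [] (fun _ s => (· ++ [pvName s])) _
    (by simp [PySem.Dict.keys_empty])

theorem pvGetD_catsOf (skills : List (List (String × String))) (c : String) :
    (pvCatsOf skills).getD c []
      = ((skills.filter pvHasName).filter (fun s => pvEff s == c)).map pvName := by
  unfold pvCatsOf
  rw [show ((skills.filter pvHasName).foldl (fun d s => d.modify (pvEff s) [] (· ++ [pvName s]))
        PySem.Dict.empty)
      = (((skills.filter pvHasName).map (fun s => (pvEff s, pvName s))).foldl
          (fun d p => d.modify p.1 [] (· ++ [p.2])) PySem.Dict.empty) from (List.foldl_map (f := fun s => (pvEff s, pvName s)) (g := fun (d : PySem.Dict String (List String)) (p : String × String) => d.modify p.1 [] (· ++ [p.2]))).symm]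
  rw [PySem.Dict.getD_foldl_modify_append]
  simp [List.filter_map, Function.comp_def]
theorem pvLoop1 (cats : PySem.Dict String (List String)) :
    ∀ (L : List String) (ord : PySem.Dict String (List String)), L.Nodup →
      (∀ c ∈ L, ord.contains c = false) →
      (L.foldl (fun ord cat =>
        if cats.contains cat then ord.insert cat (cats.getD cat []) else ord) ord).items
      = ord.items ++ (L.filter (fun c => cats.contains c)).map (fun c => (c, cats.getD c [])) := by
  intro L
  induction L with
  | nil => intro ord _ _; simp
  | cons c rest ih =>
    intro ord hnd hfresh
    simp only [List.foldl_cons, List.filter_cons]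
    by_cases hc : cats.contains c = true
    · rw [if_pos hc, ih _ (List.Nodup.of_cons hnd) ?fresh]
      · rw [PySem.Dict.items_insert_of_not_contains _ _ (hfresh c (by simp))]
        simp [hc]
      case fresh =>
        intro c' hc'
        rw [PySem.Dict.contains_insert]
        have hne : c' ≠ c := by
          rintro rfl; exact (List.nodup_cons.mp hnd).1 hc'
        simp [hne, hfresh c' (by simp [hc'])]
    · rw [if_neg hc, ih _ (List.Nodup.of_cons hnd) (fun c' h => hfresh c' (by simp [h]))]
      simp [Bool.eq_false_iff.mpr hc]

theorem pvLoop2 :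
    ∀ (its : List (String × List String)) (ord : PySem.Dict String (List String)),
      (its.map (·.1)).Nodup →
      (its.foldl (fun ord p => if ord.contains p.1 then ord else ord.insert p.1 p.2) ord).items
      = ord.items ++ its.filter (fun p => !ord.contains p.1) := by
  intro its
  induction its with
  | nil => intro ord _; simp
  | cons p rest ih =>
    intro ord hnd
    rw [List.map_cons, List.nodup_cons] at hnd
    simp only [List.foldl_cons, List.filter_cons]
    by_cases hc : ord.contains p.1 = true
    · rw [if_pos hc, ih _ hnd.2]
      simp [hc]
    · have hc' : ord.contains p.1 = false := Bool.eq_false_iff.mpr hc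
      rw [if_neg hc, ih _ hnd.2]
      rw [PySem.Dict.items_insert_of_not_contains _ _ hc']
      have hfilt : rest.filter (fun q => !(ord.insert p.1 p.2).contains q.1)
          = rest.filter (fun q => !ord.contains q.1) := by
        apply List.filter_congr
        intro q hq
        have hne : q.1 ≠ p.1 := by
          intro he
          exact hnd.1 (he ▸ List.mem_map_of_mem hq)
        rw [PySem.Dict.contains_insert]
        simp [hne]
      simp [hc', hfilt]

theorem pvFoldA_eq (skills : List (List (String × String))) :
    skills.foldl (fun cats skill =>
      match List.lookup "name" skill with
      | none => cats
      | some name =>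
        if name = "" then cats
        else
          let category :=
            match List.lookup "category" skill with
            | none => "Domain Skills"
            | some c => if c = "" then "Domain Skills" else c
          cats.modify category [] (· ++ [name])) PySem.Dict.empty = pvCatsOf skills :=
  pvFoldA_aux skills PySem.Dict.empty

-- ===== VERDICT (by name: the statement is the Claim_ definition above) =====
theorem rebuild_skill_categories_spec : Claim_equal_rebuild_skill_categories := by
  intro skills _
  unfold Spec_rebuild_skill_categories
  simp only [rebuild_skill_categories, rebuild_skill_categories_alt]
  rw [pvFoldA_eq]
  have hseen : (List.foldl (fun seen s => PySem.Set.add seen (pvEff s)) [] (skills.filter pvHasName))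
      = PySem.Set.ofList ((skills.filter pvHasName).map pvEff) := by
    rw [PySem.Set.ofList_eq_foldl, List.foldl_map]
  have hnodupitems : ((pvCatsOf skills).items.map (·.1)).Nodup := by
    have h := pvNodup_keys_catsOf skills
    simpa [PySem.Dict.keys] using h
  rw [pvLoop2 _ _ hnodupitems]
  rw [pvLoop1 (pvCatsOf skills) pvCategoryOrder PySem.Dict.empty (by decide)
        (fun c _ => PySem.Dict.contains_empty c)]
  have hcont : ∀ c : String, (pvCatsOf skills).contains c
      = (PySem.Set.ofList ((skills.filter pvHasName).map pvEff)).contains c := by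
    intro c
    rw [PySem.Dict.contains_eq_decide_mem_keys, pvKeys_catsOf]
    simp [PySem.Set.contains, List.contains_eq_mem]
  have hO1items : (List.foldl
        (fun ord cat =>
          if (pvCatsOf skills).contains cat = true then ord.insert cat ((pvCatsOf skills).getD cat [])
          else ord) PySem.Dict.empty pvCategoryOrder).items
      = (pvCategoryOrder.filter (fun c => (pvCatsOf skills).contains c)).map
          (fun c => (c, (pvCatsOf skills).getD c [])) := by
    simpa using pvLoop1 (pvCatsOf skills) pvCategoryOrder PySem.Dict.empty (by decide)
      (fun c _ => PySem.Dict.contains_empty c)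
  have hfc : ∀ p ∈ (pvCatsOf skills).items,
      (!(List.foldl
          (fun ord cat =>
            if (pvCatsOf skills).contains cat = true then ord.insert cat ((pvCatsOf skills).getD cat [])
            else ord) PySem.Dict.empty pvCategoryOrder).contains p.1)
      = (!pvCategoryOrder.contains p.1) := by
    intro p hp
    have hk : p.1 ∈ (pvCatsOf skills).keys := PySem.Dict.mem_keys_of_mem_items _ hp
    have hck : (pvCatsOf skills).contains p.1 = true := (PySem.Dict.contains_iff_mem_keys _ _).mpr hk
    rw [PySem.Dict.contains_eq_decide_mem_keys]
    simp only [PySem.Dict.keys, hO1items, List.map_map]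
    simp [List.mem_filter, hck, List.contains_eq_mem, Function.comp_def]
  rw [List.filter_congr hfc,
      PySem.Dict.items_eq_map_keys _ (pvNodup_keys_catsOf skills) [],
      pvKeys_catsOf, List.filter_map, hseen]
  rw [List.map_append]
  congr 1
  · rw [List.filter_congr (fun c _ => hcont c)]
    apply List.map_congr_left
    intro c _
    simp [pvGetD_catsOf, pvName]
  · apply List.map_congr_left
    intro c _
    simp [pvGetD_catsOf, pvName]
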